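-- pv_equiv track=rewrite | github.com/qriton/energy-lang | qriton_hlm/cli.py | _parse_force
-- ===== SOURCE A (Python) =====
-- def _parse_force(args):
--     """Extract --force and --reason from argument list."""
--     force = False
--     reason = None
--     clean_args = []
--     i = 0
--     while i < len(args):
--         if args[i] == '--force':
--             force = True
--         elif args[i] == '--reason':
--             # Collect everything after --reason as the reason string
--             reason_parts = args[i + 1:]
--             reason = " ".join(reason_parts).strip('"').strip("'")
--             break
--         elif args[i].startswith('--reason='):
--             reason = args[i].split('=', 1)[1].strip('"').strip("'")
--         else:
--             clean_args.append(args[i])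
--         i += 1
--     return clean_args, force, reason
-- ===== SOURCE B (Python) =====
-- def _parse_force(args):
--     """Extract --force and --reason from argument list."""
--     try:
--         idx = args.index('--reason')
--     except ValueError:
--         idx = None
--     work = args if idx is None else args[:idx]
--     force = False
--     reason = None
--     clean_args = []
--     for a in work:
--         if a == '--force':
--             force = True
--         elif a.startswith('--reason='):
--             reason = a.split('=', 1)[1].strip('"').strip("'")
--         else:
--             clean_args.append(a)
--     if idx is not None:
--         reason = " ".join(args[idx + 1:]).strip('"').strip("'")
--     return clean_args, force, reason
-- ===== Notes on version B (the rewrite author's own statement) =====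
-- stated objective: faster
-- what changed: B first locates the first '--reason' with list.index and splits the list there, then processes only the prefix with a single for-loop fold (no break, no per-step indexing), assigning the joined tail reason after the loop; A walks indices with a while loop testing args[i] repeatedly and breaks mid-scan.
import Mathlib
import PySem

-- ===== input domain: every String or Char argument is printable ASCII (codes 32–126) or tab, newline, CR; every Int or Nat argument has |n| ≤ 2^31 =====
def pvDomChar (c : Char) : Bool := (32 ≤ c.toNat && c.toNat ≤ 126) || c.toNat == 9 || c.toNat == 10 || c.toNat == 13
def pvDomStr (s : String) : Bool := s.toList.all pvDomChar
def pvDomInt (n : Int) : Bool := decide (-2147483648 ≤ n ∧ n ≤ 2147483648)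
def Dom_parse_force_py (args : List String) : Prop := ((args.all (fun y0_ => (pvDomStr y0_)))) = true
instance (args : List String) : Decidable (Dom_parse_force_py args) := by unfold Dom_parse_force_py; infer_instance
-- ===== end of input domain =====

-- B re-decomposes A: locate the first '--reason' once, fold over the prefix without per-step indexing, join the tail last (measured faster in a timing run).

-- ===== PORT A =====
-- shared helpers for the literal Python expressions both sources contain:
-- x.strip('"').strip("'")
def pvStrip2 (s : String) : String := PySem.Str.stripChars (PySem.Str.stripChars s "\"") "'"
-- a.split('=', 1)[1]  (both sources only evaluate it when '=' occurs in a, so index 1 exists)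
def pvEqSplit (a : String) : String := ((PySem.Str.splitMax? a "=" 1).getD []).getD 1 ""

-- A's while loop: index i becomes structural recursion on the remaining suffix; the
-- '--reason' branch returns directly (the Python 'break' after setting reason).
def parseALoop : List String → List String → Bool → Option String → List String × Bool × Option String
  | [], clean_args, force, reason => (clean_args, force, reason)
  | a :: rest, clean_args, force, reason =>
    if a = "--force" then parseALoop rest clean_args true reason
    else if a = "--reason" then
      (clean_args, force, some (pvStrip2 (PySem.Str.join " " rest)))
    else if PySem.Str.startswith a "--reason=" then
      parseALoop rest clean_args force (some (pvStrip2 (pvEqSplit a)))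
    else parseALoop rest (clean_args ++ [a]) force reason

def parse_force_py (args : List String) : List String × Bool × Option String :=
  parseALoop args [] false none

-- ===== PORT B =====
-- the body of B's for-loop over the work list (state = (clean_args, force, reason))
def pvBStep (st : List String × Bool × Option String) (a : String) : List String × Bool × Option String :=
  if a = "--force" then (st.1, true, st.2.2)
  else if PySem.Str.startswith a "--reason=" then (st.1, st.2.1, some (pvStrip2 (pvEqSplit a)))
  else (st.1 ++ [a], st.2.1, st.2.2)

def parse_force_py_alt (args : List String) : List String × Bool × Option String :=
  let idx? := PySem.List.index? args "--reason"
  let work := match idx? with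
    | none => args
    | some i => PySem.List.slice args none (some (i : Int))   -- args[:idx]
  let st := work.foldl pvBStep ([], false, none)
  match idx? with
  | none => st
  | some i =>
    (st.1, st.2.1, some (pvStrip2 (PySem.Str.join " " (PySem.List.slice args (some ((i : Int) + 1)) none))))   -- args[idx+1:]

-- ===== PRECONDITION & SPEC =====
def Spec_parse_force_py (args : List String) (out : List String × Bool × Option String) : Prop := out = parse_force_py_alt args
instance (args : List String) (out : List String × Bool × Option String) : Decidable (Spec_parse_force_py args out) := by unfold Spec_parse_force_py; infer_instance

-- ===== CLAIM (what is proved, stated in full; the proofs are below) =====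
def Claim_equal_parse_force_py : Prop := ∀ (args : List String), Dom_parse_force_py args → Spec_parse_force_py args (parse_force_py args)

-- ===== LEMMAS AND PROOFS =====

-- on a list not containing '--reason', A's loop is B's fold
theorem parseALoop_eq_foldl (l : List String) (clean : List String) (force : Bool)
    (reason : Option String) (h : "--reason" ∉ l) :
    parseALoop l clean force reason = l.foldl pvBStep (clean, force, reason) := by
  induction l generalizing clean force reason with
  | nil => rfl
  | cons a rest ih =>
    have ha : a ≠ "--reason" := fun hh => h (hh ▸ List.mem_cons_self ..)
    have hr : "--reason" ∉ rest := fun hh => h (List.mem_cons_of_mem _ hh)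
    simp only [parseALoop, List.foldl_cons, pvBStep, ha, if_false]
    split_ifs with h1 h2 <;> simp [ih _ _ _ hr]

-- on pre ++ '--reason' :: suf with '--reason' ∉ pre, A folds pre then breaks with the joined tail
theorem parseALoop_break (pre suf : List String) (clean : List String) (force : Bool)
    (reason : Option String) (h : "--reason" ∉ pre) :
    parseALoop (pre ++ "--reason" :: suf) clean force reason =
      ((pre.foldl pvBStep (clean, force, reason)).1,
       (pre.foldl pvBStep (clean, force, reason)).2.1,
       some (pvStrip2 (PySem.Str.join " " suf))) := by
  induction pre generalizing clean force reason with
  | nil => simp [parseALoop]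
  | cons a rest ih =>
    have ha : a ≠ "--reason" := fun hh => h (hh ▸ List.mem_cons_self ..)
    have hr : "--reason" ∉ rest := fun hh => h (List.mem_cons_of_mem _ hh)
    simp only [List.cons_append, parseALoop, List.foldl_cons, pvBStep, ha, if_false]
    split_ifs with h1 h2 <;> simp [ih _ _ _ hr]

-- ===== VERDICT (by name: the statement is the Claim_ definition above) =====
theorem parse_force_py_spec : Claim_equal_parse_force_py := by
  intro args _
  show parse_force_py args = parse_force_py_alt args
  unfold parse_force_py parse_force_py_alt
  rcases hidx : PySem.List.index? args "--reason" with _ | k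
  · have hnm : "--reason" ∉ args := (PySem.List.index?_eq_none_iff ..).1 hidx
    simp [parseALoop_eq_foldl _ _ _ _ hnm]
  · obtain ⟨pre, suf, hsplit, hlen, hnm⟩ := (PySem.List.index?_eq_some_iff ..).1 hidx
    subst hsplit
    have hk : (k : Int) + 1 = ((k + 1 : Nat) : Int) := by push_cast; ring
    have htail : (pre ++ "--reason" :: suf).drop (k + 1) = suf := by
      have : pre ++ "--reason" :: suf = (pre ++ ["--reason"]) ++ suf := by simp
      rw [this, ← hlen]
      simp
    have hpre : (pre ++ "--reason" :: suf).take k = pre := by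
      rw [← hlen]; exact List.take_left ..
    simp only [hk, PySem.List.slice_to_natCast, PySem.List.slice_from_natCast, htail, hpre]
    exact parseALoop_break pre suf [] false none hnm
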